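-- pv_equiv track=rewrite | github.com/silviu26/Python | lab3/tema2.py | ex4
-- ===== SOURCE A (Python) =====
-- def ex4(note,pozitie,start):
--     curent=start
--     v=[]
--     v.append(note[curent])
--     for i in pozitie:
--         curent=(curent+i)%(len(note))
--         v.append(note[curent])
--     return v
-- ===== SOURCE B (Python) =====
-- def ex4(note, pozitie, start):
--     # Two-pass: first compute the running (raw) sums of steps, then look up notes.
--     n = len(note)
--     sums = [start]
--     for i in pozitie:
--         sums.append(sums[-1] + i)
--     return [note[sums[0]]] + [note[s % n] for s in sums[1:]]
-- ===== Notes on version B (the rewrite author's own statement) =====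
-- stated objective: alternative
-- what changed: B separates index computation from note lookup: it builds the list of raw cumulative step sums in one pass and then maps each sum (mod len) to its note in a second pass, instead of A's fused update-index-and-append loop; correctness rests on mod distributing over the running sum.
import Mathlib
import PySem

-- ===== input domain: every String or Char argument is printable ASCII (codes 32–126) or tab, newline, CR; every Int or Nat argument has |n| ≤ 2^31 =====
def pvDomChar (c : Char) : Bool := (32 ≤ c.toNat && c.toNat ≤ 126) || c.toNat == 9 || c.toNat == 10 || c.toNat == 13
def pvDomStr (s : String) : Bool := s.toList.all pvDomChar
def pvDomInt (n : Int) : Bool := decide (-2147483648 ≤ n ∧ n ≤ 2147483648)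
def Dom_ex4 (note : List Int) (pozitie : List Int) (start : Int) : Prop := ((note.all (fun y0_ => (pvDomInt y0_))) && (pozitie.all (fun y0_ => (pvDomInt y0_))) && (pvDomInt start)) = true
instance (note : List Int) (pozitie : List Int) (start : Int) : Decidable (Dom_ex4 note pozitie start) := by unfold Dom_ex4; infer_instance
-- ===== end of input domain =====

-- B separates index computation (running raw sums of steps) from note lookup (a map
-- over those sums mod len), replacing A's fused update-index-and-append loop; same cost.

-- ===== PORT A =====
def ex4 (note : List Int) (pozitie : List Int) (start : Int) : List Int :=
  -- curent = start; v = [note[curent]]; for i in pozitie: curent=(curent+i)%len(note); v.append(note[curent])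
  (pozitie.foldl
    (fun (st : Int × List Int) i =>
      let c := PySem.Int.mod (st.1 + i) (note.length : Int)
      (c, st.2 ++ [(PySem.List.pyGet? note c).getD 0]))
    (start, [(PySem.List.pyGet? note start).getD 0])).2

-- ===== PORT B =====
-- running sums: the loop 'for i in pozitie: sums.append(sums[-1] + i)', carrying sums[-1]
def pvSums (last : Int) : List Int → List Int
  | [] => []
  | i :: rest => (last + i) :: pvSums (last + i) rest

def ex4_alt (note : List Int) (pozitie : List Int) (start : Int) : List Int :=
  let n : Int := note.length
  -- [note[sums[0]]] + [note[s % n] for s in sums[1:]], with sums = start :: pvSums start pozitie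
  (PySem.List.pyGet? note start).getD 0 ::
    (pvSums start pozitie).map (fun s => (PySem.List.pyGet? note (PySem.Int.mod s n)).getD 0)

-- ===== PRECONDITION & SPEC =====
-- Pre_: Python A raises IndexError on note[start] (and ZeroDivisionError for empty note)
-- unless start is a valid (possibly negative) index into note.
def Pre_ex4 (note : List Int) (_pozitie : List Int) (start : Int) : Prop :=
  PySem.Raise.InRange note.length start
instance (note : List Int) (pozitie : List Int) (start : Int) : Decidable (Pre_ex4 note pozitie start) := by unfold Pre_ex4; infer_instance

def pvWitness_ex4 : List Int × List Int × Int := ([3, 1, 4], [2, -1, 5], -2)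

def Spec_ex4 (note : List Int) (pozitie : List Int) (start : Int) (out : List Int) : Prop := out = ex4_alt note pozitie start
instance (note : List Int) (pozitie : List Int) (start : Int) (out : List Int) : Decidable (Spec_ex4 note pozitie start out) := by unfold Spec_ex4; infer_instance

-- ===== CLAIM (what is proved, stated in full; the proofs are below) =====
def Claim_equal_ex4 : Prop := ∀ (note : List Int) (pozitie : List Int) (start : Int), Dom_ex4 note pozitie start → Pre_ex4 note pozitie start → Spec_ex4 note pozitie start (ex4 note pozitie start)

-- ===== LEMMAS AND PROOFS =====

lemma ex4_loop_eq (note : List Int) (hn : 0 < (note.length : Int)) :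
    ∀ (pozitie : List Int) (c s : Int) (v : List Int),
      PySem.Int.mod c (note.length : Int) = PySem.Int.mod s (note.length : Int) →
      (pozitie.foldl
        (fun (st : Int × List Int) i =>
          let c := PySem.Int.mod (st.1 + i) (note.length : Int)
          (c, st.2 ++ [(PySem.List.pyGet? note c).getD 0]))
        (c, v)).2
      = v ++ (pvSums s pozitie).map
          (fun t => (PySem.List.pyGet? note (PySem.Int.mod t (note.length : Int))).getD 0) := by
  intro pozitie
  induction pozitie with
  | nil => intro c s v _; simp [pvSums]
  | cons i rest ih =>
    intro c s v h
    have hne : (note.length : Int) ≠ 0 := ne_of_gt hn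
    have hstep : PySem.Int.mod (c + i) (note.length : Int)
        = PySem.Int.mod (s + i) (note.length : Int) := by
      simp only [PySem.Int.mod_eq_emod_of_pos hn] at h ⊢
      rw [Int.add_emod, h, ← Int.add_emod]
    have hinv : PySem.Int.mod (PySem.Int.mod (c + i) (note.length : Int)) (note.length : Int)
        = PySem.Int.mod (s + i) (note.length : Int) := by
      simp only [PySem.Int.mod_eq_emod_of_pos hn] at hstep ⊢
      rw [Int.emod_emod_of_dvd _ dvd_rfl, hstep]
    simp only [List.foldl_cons, pvSums, List.map_cons]
    rw [ih _ (s + i) _ hinv, hstep]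
    simp

theorem ex4_spec : Claim_equal_ex4 := by
  intro note pozitie start _ hpre
  unfold Spec_ex4 ex4 ex4_alt
  have hn : 0 < (note.length : Int) := by
    unfold Pre_ex4 PySem.Raise.InRange at hpre
    omega
  rw [ex4_loop_eq note hn pozitie start start _ rfl]
  simp
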